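-- pv_equiv track=rewrite | github.com/rsarwas/aoc | 2019-03/answers.py | vertices_from_cmds
-- ===== SOURCE A (Python) =====
-- def vertices_from_cmds(start, cmds):
--     vertices = [start]
--     previous = start
--     for cmd in cmds:
--         x, y = previous
--         if cmd[0] == "R":
--             x += cmd[1]
--         elif cmd[0] == "L":
--             x -= cmd[1]
--         elif cmd[0] == "U":
--             y += cmd[1]
--         elif cmd[0] == "D":
--             y -= cmd[1]
--         else:
--             raise NotImplementedError
--         vertices.append((x, y))
--         previous = (x, y)
--     return vertices
-- ===== SOURCE B (Python) =====
-- def _partial_sums(first, deltas):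
--     sums = [first]
--     cur = first
--     for d in deltas:
--         cur += d
--         sums.append(cur)
--     return sums
--
--
-- def vertices_from_cmds(start, cmds):
--     for cmd in cmds:
--         if cmd[0] not in ("R", "L", "U", "D"):
--             raise NotImplementedError
--     dxs = [n if d == "R" else -n if d == "L" else 0 for d, n in cmds]
--     dys = [n if d == "U" else -n if d == "D" else 0 for d, n in cmds]
--     return list(zip(_partial_sums(start[0], dxs), _partial_sums(start[1], dys)))
-- ===== Notes on version B (the rewrite author's own statement) =====
-- stated objective: alternative
-- what changed: B decomposes the problem coordinate-wise: it validates the commands, builds independent x- and y-delta lists, running-sums each axis separately, and zips the two coordinate sequences, instead of A's single loop that branches per direction while tracking the previous vertex pair.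
import Mathlib
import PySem

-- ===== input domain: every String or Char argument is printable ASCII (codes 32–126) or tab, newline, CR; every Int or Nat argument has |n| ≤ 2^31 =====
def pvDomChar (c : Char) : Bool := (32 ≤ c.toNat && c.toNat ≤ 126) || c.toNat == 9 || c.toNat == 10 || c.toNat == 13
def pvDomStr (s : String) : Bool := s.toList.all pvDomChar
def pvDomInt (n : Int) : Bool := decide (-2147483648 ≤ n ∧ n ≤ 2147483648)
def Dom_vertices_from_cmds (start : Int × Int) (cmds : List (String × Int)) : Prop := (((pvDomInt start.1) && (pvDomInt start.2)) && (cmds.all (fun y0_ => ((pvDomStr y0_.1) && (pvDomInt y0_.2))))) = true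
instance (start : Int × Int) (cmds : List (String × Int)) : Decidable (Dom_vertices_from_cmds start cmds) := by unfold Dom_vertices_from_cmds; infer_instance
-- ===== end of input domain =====

-- B decomposes coordinate-wise: validate, build per-axis delta lists, running-sum
-- each axis independently, zip the two sequences (objective: alternative).


-- ===== PORT A =====
-- Literal port of A: one fold over the commands carrying (vertices, previous);
-- the final else branch is Python's `raise NotImplementedError`, excluded by Pre_
-- (the port leaves the point unchanged there; nothing is claimed on such inputs).
def vertices_from_cmds (start : Int × Int) (cmds : List (String × Int)) : List (Int × Int) :=
  (cmds.foldl (fun (st : List (Int × Int) × (Int × Int)) cmd =>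
      let x := st.2.1
      let y := st.2.2
      let p : Int × Int :=
        if cmd.1 = "R" then (x + cmd.2, y)
        else if cmd.1 = "L" then (x - cmd.2, y)
        else if cmd.1 = "U" then (x, y + cmd.2)
        else if cmd.1 = "D" then (x, y - cmd.2)
        else (x, y)  -- unreachable under Pre_: Python raises NotImplementedError
      (st.1 ++ [p], p))
    ([start], start)).1

-- ===== PORT B =====
-- Source B's _partial_sums: running sums of one axis's deltas, carrying (sums, cur)
def pvPartialSums (first : Int) (deltas : List Int) : List Int :=
  (deltas.foldl (fun (st : List Int × Int) d => (st.1 ++ [st.2 + d], st.2 + d))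
    ([first], first)).1

-- Source B's validation loop raises NotImplementedError on a bad command; that is
-- excluded by Pre_, so the port omits it (nothing is claimed on such inputs).
def vertices_from_cmds_alt (start : Int × Int) (cmds : List (String × Int)) : List (Int × Int) :=
  let dxs := cmds.map (fun c => if c.1 = "R" then c.2 else if c.1 = "L" then -c.2 else 0)
  let dys := cmds.map (fun c => if c.1 = "U" then c.2 else if c.1 = "D" then -c.2 else 0)
  List.zip (pvPartialSums start.1 dxs) (pvPartialSums start.2 dys)

-- ===== PRECONDITION & SPEC =====
-- Pre_ excludes exactly the inputs on which Python A (and B) raise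
-- NotImplementedError: a command whose direction is not "R","L","U","D".
def Pre_vertices_from_cmds (start : Int × Int) (cmds : List (String × Int)) : Prop :=
  ∀ c ∈ cmds, c.1 = "R" ∨ c.1 = "L" ∨ c.1 = "U" ∨ c.1 = "D"
instance (start : Int × Int) (cmds : List (String × Int)) : Decidable (Pre_vertices_from_cmds start cmds) := by unfold Pre_vertices_from_cmds; infer_instance
def pvWitness_vertices_from_cmds : (Int × Int) × (List (String × Int)) := ((0, 0), [("R", 2), ("U", 3), ("L", 1), ("D", 4)])

def Spec_vertices_from_cmds (start : Int × Int) (cmds : List (String × Int)) (out : List (Int × Int)) : Prop := out = vertices_from_cmds_alt start cmds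
instance (start : Int × Int) (cmds : List (String × Int)) (out : List (Int × Int)) : Decidable (Spec_vertices_from_cmds start cmds out) := by unfold Spec_vertices_from_cmds; infer_instance

-- ===== CLAIM =====
def Claim_equal_vertices_from_cmds : Prop := ∀ (start : Int × Int) (cmds : List (String × Int)), Dom_vertices_from_cmds start cmds → Pre_vertices_from_cmds start cmds → Spec_vertices_from_cmds start cmds (vertices_from_cmds start cmds)

-- ===== LEMMAS AND PROOFS =====
-- per-command delta pair (proof-side canonical form)
def pvDelta (c : String × Int) : Int × Int :=
  ((if c.1 = "R" then c.2 else if c.1 = "L" then -c.2 else 0),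
   (if c.1 = "U" then c.2 else if c.1 = "D" then -c.2 else 0))

-- A's fold equals the prefix-sum scan of the delta pairs
theorem pv_fold_scan (cmds : List (String × Int)) :
    ∀ (acc : List (Int × Int)) (prev : Int × Int),
    (∀ c ∈ cmds, c.1 = "R" ∨ c.1 = "L" ∨ c.1 = "U" ∨ c.1 = "D") →
    (cmds.foldl (fun (st : List (Int × Int) × (Int × Int)) cmd =>
        let x := st.2.1
        let y := st.2.2
        let p : Int × Int :=
          if cmd.1 = "R" then (x + cmd.2, y)
          else if cmd.1 = "L" then (x - cmd.2, y)
          else if cmd.1 = "U" then (x, y + cmd.2)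
          else if cmd.1 = "D" then (x, y - cmd.2)
          else (x, y)
        (st.1 ++ [p], p))
      (acc ++ [prev], prev)).1
      = acc ++ (cmds.map pvDelta).scanl (fun p d => (p.1 + d.1, p.2 + d.2)) prev := by
  induction cmds with
  | nil => intro acc prev _; simp
  | cons c rest ih =>
    intro acc prev hpre
    have hc := hpre c (List.mem_cons_self ..)
    have hrest : ∀ c ∈ rest, c.1 = "R" ∨ c.1 = "L" ∨ c.1 = "U" ∨ c.1 = "D" :=
      fun c hc => hpre c (List.mem_cons_of_mem _ hc)
    have hstep :
        (if c.1 = "R" then (prev.1 + c.2, prev.2)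
         else if c.1 = "L" then (prev.1 - c.2, prev.2)
         else if c.1 = "U" then (prev.1, prev.2 + c.2)
         else if c.1 = "D" then (prev.1, prev.2 - c.2)
         else (prev.1, prev.2)) = (prev.1 + (pvDelta c).1, prev.2 + (pvDelta c).2) := by
      rcases hc with h | h | h | h <;> simp [pvDelta, h] <;> ring_nf
    have h2 := ih (acc ++ [prev])
      (prev.1 + (pvDelta c).1, prev.2 + (pvDelta c).2) hrest
    simp only [List.foldl_cons, List.map_cons, List.scanl_cons, hstep]
    simp only [List.append_assoc, List.cons_append, List.nil_append] at h2 ⊢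
    exact h2

-- B's per-axis running-sum fold equals a scalar scanl
theorem pv_psums_scan (ds : List Int) :
    ∀ (acc : List Int) (cur : Int),
    (ds.foldl (fun (st : List Int × Int) d => (st.1 ++ [st.2 + d], st.2 + d))
      (acc ++ [cur], cur)).1 = acc ++ ds.scanl (· + ·) cur := by
  induction ds with
  | nil => intro acc cur; simp
  | cons d rest ih =>
    intro acc cur
    have h2 := ih (acc ++ [cur]) (cur + d)
    simp only [List.foldl_cons, List.scanl_cons]
    simp only [List.append_assoc, List.cons_append, List.nil_append] at h2 ⊢
    exact h2

-- zipping two scalar scans is the pairwise scan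
theorem pv_zip_scanl (ds : List (Int × Int)) :
    ∀ (x y : Int),
    List.zip ((ds.map Prod.fst).scanl (· + ·) x) ((ds.map Prod.snd).scanl (· + ·) y)
      = ds.scanl (fun p d => (p.1 + d.1, p.2 + d.2)) (x, y) := by
  induction ds with
  | nil => intro x y; simp
  | cons d rest ih =>
    intro x y
    simp only [List.map_cons, List.scanl_cons, List.zip_cons_cons]
    exact congrArg _ (ih (x + d.1) (y + d.2))

-- ===== VERDICT =====
theorem vertices_from_cmds_spec : Claim_equal_vertices_from_cmds := by
  intro start cmds _ hpre
  show vertices_from_cmds start cmds = vertices_from_cmds_alt start cmds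
  unfold vertices_from_cmds vertices_from_cmds_alt pvPartialSums
  dsimp only
  have hA := pv_fold_scan cmds [] start hpre
  have hX := pv_psums_scan (cmds.map (fun c => if c.1 = "R" then c.2 else if c.1 = "L" then -c.2 else 0)) [] start.1
  have hY := pv_psums_scan (cmds.map (fun c => if c.1 = "U" then c.2 else if c.1 = "D" then -c.2 else 0)) [] start.2
  simp only [List.nil_append] at hA hX hY
  rw [hA, hX, hY]
  have hmapx : cmds.map (fun c => if c.1 = "R" then c.2 else if c.1 = "L" then -c.2 else 0)
      = (cmds.map pvDelta).map Prod.fst := by simp [pvDelta, Function.comp]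
  have hmapy : cmds.map (fun c => if c.1 = "U" then c.2 else if c.1 = "D" then -c.2 else 0)
      = (cmds.map pvDelta).map Prod.snd := by simp [pvDelta, Function.comp]
  rw [hmapx, hmapy, pv_zip_scanl]
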